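-- pv_equiv track=rewrite | github.com/Chocon2911/Tic-Tac-Toe_Statistic-Method | generate_v1_6.py | generate_base_masks
-- ===== SOURCE A (Python) =====
-- def generate_base_masks(n):
--     size = n * n
--     masks = []
--     num_rows = n // 2 if n % 2 == 0 else n // 2 + 1
--
--     for row_idx in range(num_rows):
--         row = [1 if row_idx * n <= i < (row_idx + 1) * n else 0 for i in range(size)]
--         masks.append(row)
--     diag1 = [1 if i % (n + 1) == 0 and i < size else 0 for i in range(size)]
--     masks.append(diag1)
--
--     for row_idx in range(num_rows):
--         row = [2 if row_idx * n <= i < (row_idx + 1) * n else 0 for i in range(size)]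
--         masks.append(row)
--     diag1_p2 = [2 if i % (n + 1) == 0 and i < size else 0 for i in range(size)]
--     masks.append(diag1_p2)
--
--     return masks
-- ===== SOURCE B (Python) =====
-- def generate_base_masks(n):
--     # Build the value-1 masks by shifting a single row window n places at a
--     # time, tile the diagonal out of (n+1)-long chunks, then derive the
--     # value-2 masks by elementwise doubling of the value-1 masks.
--     size = n * n
--     num_rows = (n + 1) // 2
--     base = []
--     row = [1] * n + [0] * (size - n)
--     for _ in range(num_rows):
--         base.append(row)
--         row = [0] * n + row[:size - n]
--     base.append((([1] + [0] * n) * n)[:size])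
--     return base + [[2 * x for x in m] for m in base]
-- ===== Notes on version B (the rewrite author's own statement) =====
-- stated objective: alternative
-- what changed: B builds only the value-1 masks: row masks by iteratively shifting a single row window n places (prepend n zeros, truncate), the diagonal by tiling (n+1)-long chunks and truncating to n*n, and then derives the whole value-2 half by elementwise doubling of the value-1 half, instead of A's two copy-pasted passes of per-element conditional scans over range(n*n).
-- outside the precondition, e.g. on generate_base_masks(-2): A returns [[1, 1, 1, 1], [2, 2, 2, 2]], B returns [[], []]; on generate_base_masks(-1): A raises ZeroDivisionError, B returns [[], []]
import Mathlib
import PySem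

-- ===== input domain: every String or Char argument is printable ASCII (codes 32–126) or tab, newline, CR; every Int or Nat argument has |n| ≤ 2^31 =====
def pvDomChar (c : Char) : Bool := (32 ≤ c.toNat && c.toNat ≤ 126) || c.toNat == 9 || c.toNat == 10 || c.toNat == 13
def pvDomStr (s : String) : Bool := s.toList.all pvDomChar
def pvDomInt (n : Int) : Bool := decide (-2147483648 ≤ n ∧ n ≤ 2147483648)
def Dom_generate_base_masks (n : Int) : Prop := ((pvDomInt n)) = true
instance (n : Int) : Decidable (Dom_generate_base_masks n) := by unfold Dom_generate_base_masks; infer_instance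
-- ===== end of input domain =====

-- B builds the value-1 masks by shifting one row window, tiles the diagonal from (n+1)-chunks,
-- and derives the value-2 masks by elementwise doubling; alternative decomposition, equal on n ≥ 0.


-- ===== PORT A =====
-- the row comprehension  [v if row_idx*n <= i < (row_idx+1)*n else 0 for i in range(size)]
def pvRowA (n size v row_idx : Int) : List Int :=
  (PySem.List.pyRange 0 size 1).map (fun i =>
    if row_idx * n ≤ i ∧ i < (row_idx + 1) * n then v else 0)

-- the diagonal comprehension  [v if i % (n+1) == 0 and i < size else 0 for i in range(size)]
def pvDiagA (n size v : Int) : List Int :=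
  (PySem.List.pyRange 0 size 1).map (fun i =>
    if PySem.Int.mod i (n + 1) = 0 ∧ i < size then v else 0)

def generate_base_masks (n : Int) : List (List Int) :=
  let size := n * n
  let num_rows := if PySem.Int.mod n 2 = 0 then PySem.Int.floordiv n 2
                  else PySem.Int.floordiv n 2 + 1
  let masks : List (List Int) := []
  let masks := (PySem.List.pyRange 0 num_rows 1).foldl
      (fun ms row_idx => ms ++ [pvRowA n size 1 row_idx]) masks
  let masks := masks ++ [pvDiagA n size 1]
  let masks := (PySem.List.pyRange 0 num_rows 1).foldl
      (fun ms row_idx => ms ++ [pvRowA n size 2 row_idx]) masks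
  masks ++ [pvDiagA n size 2]

-- ===== PORT B =====
-- row = [0]*n + row[:size-n]
def pvShiftB (n size : Int) (row : List Int) : List Int :=
  List.replicate n.toNat 0 ++ PySem.List.slice row none (some (size - n))

-- (([1] + [0]*n) * n)[:size]
def pvTileB (n size : Int) : List Int :=
  PySem.List.slice ((List.replicate n.toNat ((1 : Int) :: List.replicate n.toNat 0)).flatten)
    none (some size)

def generate_base_masks_alt (n : Int) : List (List Int) :=
  let size := n * n
  let num_rows := PySem.Int.floordiv (n + 1) 2
  let st := (PySem.List.pyRange 0 num_rows 1).foldl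
      (fun s _ => (s.1 ++ [s.2], pvShiftB n size s.2))
      (([] : List (List Int)), List.replicate n.toNat (1 : Int) ++ List.replicate (size - n).toNat 0)
  let base := st.1 ++ [pvTileB n size]
  base ++ base.map (fun m => m.map (fun x => 2 * x))

-- ===== PRECONDITION & SPEC =====
-- Pre_ excludes negative n: a grid of negative size is meaningless there — A raises
-- ZeroDivisionError at n = -1 and on other negative n its all-v "diagonal" rows are an
-- accident of Python's negative-divisor mod and the empty row loop.
def Pre_generate_base_masks (n : Int) : Prop := 0 ≤ n
instance (n : Int) : Decidable (Pre_generate_base_masks n) := by unfold Pre_generate_base_masks; infer_instance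
def pvWitness_generate_base_masks : Int := (3)

def Spec_generate_base_masks (n : Int) (out : List (List Int)) : Prop := out = generate_base_masks_alt n
instance (n : Int) (out : List (List Int)) : Decidable (Spec_generate_base_masks n out) := by unfold Spec_generate_base_masks; infer_instance

-- ===== CLAIM (what is proved, stated in full; the proofs are below) =====
def Claim_equal_generate_base_masks : Prop := ∀ (n : Int), Dom_generate_base_masks n → Pre_generate_base_masks n → Spec_generate_base_masks n (generate_base_masks n)
-- ===== LEMMAS AND PROOFS =====

-- block form of a row mask (proof-only helper)
def pvRowBlk (n size v r : Int) : List Int :=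
  List.replicate (r * n).toNat 0 ++ (List.replicate n.toNat v ++
    List.replicate (size - (r + 1) * n).toNat 0)

-- each row mask: conditional scan = block form
theorem pv_row_eq (n v r : Int) (hn : 0 ≤ n) (hr : 0 ≤ r) (hrn : r + 1 ≤ n) :
    pvRowA n (n * n) v r = pvRowBlk n (n * n) v r := by
  unfold pvRowA pvRowBlk
  rw [PySem.List.pyRange_one]
  have ha : 0 ≤ r * n := mul_nonneg hr hn
  have hb : r * n + n = (r + 1) * n := by ring
  have hc : (r + 1) * n ≤ n * n := by nlinarith
  apply List.ext_getElem
  · simp only [List.length_map, List.length_range, List.length_append, List.length_replicate]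
    omega
  · intro k h1 h2
    simp only [List.length_map, List.length_range] at h1
    simp only [List.getElem_map, List.getElem_range, zero_add]
    rcases lt_or_ge k (r * n).toNat with hk1 | hk1
    · rw [List.getElem_append_left (by simp only [List.length_replicate]; exact hk1),
          List.getElem_replicate, if_neg (by omega)]
    · rw [List.getElem_append_right (by simp only [List.length_replicate]; exact hk1)]
      simp only [List.length_replicate]
      rcases lt_or_ge (k - (r * n).toNat) n.toNat with hk2 | hk2
      · rw [List.getElem_append_left (by simp only [List.length_replicate]; exact hk2),
            List.getElem_replicate, if_pos (by omega)]
      · rw [List.getElem_append_right (by simp only [List.length_replicate]; exact hk2),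
            List.getElem_replicate, if_neg (by omega)]

-- num_rows agrees: A's parity split equals B's (n+1)//2
theorem pv_numrows (n : Int) :
    (if PySem.Int.mod n 2 = 0 then PySem.Int.floordiv n 2 else PySem.Int.floordiv n 2 + 1)
      = PySem.Int.floordiv (n + 1) 2 := by
  rw [PySem.Int.floordiv_eq_ediv_of_pos (by omega : (0:Int) < 2),
      PySem.Int.floordiv_eq_ediv_of_pos (by omega : (0:Int) < 2),
      PySem.Int.mod_eq_emod_of_pos (by omega : (0:Int) < 2)]
  split_ifs with h <;> omega

-- the pair-state fold appends the iterates of the shift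
theorem pv_fold_shift {α ι : Type} (f : α → α) (l : List ι) (acc : List α) (row : α) :
    l.foldl (fun s _ => (s.1 ++ [s.2], f s.2)) (acc, row)
      = (acc ++ (List.range l.length).map (fun i => f^[i] row), f^[l.length] row) := by
  induction l generalizing acc row with
  | nil => simp
  | cons x xs ih =>
    simp only [List.foldl_cons, ih, List.length_cons, List.range_succ_eq_map, List.map_cons,
      List.map_map, Function.iterate_zero_apply, Prod.mk.injEq]
    refine ⟨?_, (Function.iterate_succ_apply f xs.length row).symm⟩
    rw [List.append_assoc]
    congr 1

-- shifting r times gives the r-th block row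
theorem pv_shift_blk (m r : Nat) (hr : r + 2 ≤ m) :
    pvShiftB (m : Int) ((m : Int) * m) (pvRowBlk (m : Int) ((m : Int) * m) 1 (r : Int))
      = pvRowBlk (m : Int) ((m : Int) * m) 1 ((r : Int) + 1) := by
  unfold pvShiftB pvRowBlk
  rw [PySem.List.slice_to _ (by push_cast; nlinarith : (0:Int) ≤ (m:Int) * m - m)]
  have hle1 : (r + 1) * m ≤ m * m := Nat.mul_le_mul_right m (by omega)
  have hle2 : (r + 2) * m ≤ m * m := Nat.mul_le_mul_right m (by omega)
  have hle3 : m ≤ m * m := Nat.le_mul_of_pos_left m (by omega)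
  have e1 : (((r:Int)) * m).toNat = r * m := by
    rw [show ((r:Int) * m) = ((r * m : Nat) : Int) by norm_cast, Int.toNat_natCast]
  have e2 : ((m:Int)).toNat = m := by omega
  have e3 : (((m:Int)) * m - ((r:Int) + 1) * m).toNat = m * m - (r + 1) * m := by
    rw [show ((m:Int) * m - ((r:Int) + 1) * m) = ((m * m - (r + 1) * m : Nat) : Int) by
      push_cast [Nat.cast_sub hle1]; ring, Int.toNat_natCast]
  have e4 : (((m:Int)) * m - m).toNat = m * m - m := by
    rw [show ((m:Int) * m - m) = ((m * m - m : Nat) : Int) by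
      push_cast [Nat.cast_sub hle3]; ring, Int.toNat_natCast]
  have e5 : (((r:Int) + 1) * m).toNat = (r + 1) * m := by
    rw [show (((r:Int) + 1) * m) = (((r + 1) * m : Nat) : Int) by push_cast; ring,
      Int.toNat_natCast]
  have e6 : (((m:Int)) * m - ((r:Int) + 1 + 1) * m).toNat = m * m - (r + 2) * m := by
    rw [show ((m:Int) * m - ((r:Int) + 1 + 1) * m) = ((m * m - (r + 2) * m : Nat) : Int) by
      push_cast [Nat.cast_sub hle2]; ring, Int.toNat_natCast]
  rw [e1, e2, e3, e4, e5, e6]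
  have h1 : r * m + m ≤ m * m - m :=
    Nat.le_sub_of_add_le (by calc r * m + m + m = (r + 2) * m := by ring
                               _ ≤ m * m := hle2)
  rw [List.take_append, List.take_of_length_le
        (by simp only [List.length_replicate]; omega),
      List.take_append, List.take_of_length_le
        (by simp only [List.length_replicate]; omega),
      List.take_replicate, List.length_replicate, List.length_replicate]
  rw [← List.append_assoc, ← List.replicate_add, ← List.append_assoc]
  have hm : m + r * m = (r + 1) * m := by ring
  have hz : min (m * m - m - r * m - m) (m * m - (r + 1) * m) = m * m - (r + 2) * m := by
    have e7 : r * m + m + m = (r + 2) * m := by ring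
    have e8 : (r + 1) * m ≤ (r + 2) * m := Nat.mul_le_mul_right m (by omega)
    omega
  rw [hm, hz, List.append_assoc]

theorem pv_iter_blk (m : Nat) (r : Nat) (hr : r + 1 ≤ m) :
    (pvShiftB (m : Int) ((m : Int) * m))^[r]
        (List.replicate ((m:Int)).toNat 1 ++ List.replicate (((m:Int) * m - m)).toNat 0)
      = pvRowBlk (m : Int) ((m : Int) * m) 1 (r : Int) := by
  induction r with
  | zero =>
    unfold pvRowBlk
    simp
  | succ k ih =>
    rw [Function.iterate_succ_apply', ih (by omega), pv_shift_blk m k (by omega)]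
    push_cast
    ring_nf

-- element of a flattened replicate: the chunk pattern repeats
theorem pv_flat_rep_get {α : Type} (l : List α) (hl : 0 < l.length) :
    ∀ (c j : Nat) (h : j < ((List.replicate c l).flatten).length),
      ((List.replicate c l).flatten)[j]'h = l[j % l.length]'(Nat.mod_lt _ hl) := by
  intro c
  induction c with
  | zero => intro j h; simp at h
  | succ k ih =>
    intro j h
    simp only [List.replicate_succ, List.flatten_cons]
    rcases lt_or_ge j l.length with hj | hj
    · rw [List.getElem_append_left hj]
      congr 1
      exact (Nat.mod_eq_of_lt hj).symm
    · rw [List.getElem_append_right hj, ih]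
      congr 1
      exact (Nat.mod_eq_sub_mod hj).symm

-- the tiled diagonal equals A's mod-scan diagonal
theorem pv_tile_eq (n : Int) (hn : 0 ≤ n) :
    pvTileB n (n * n) = pvDiagA n (n * n) 1 := by
  obtain ⟨m, rfl⟩ := Int.eq_ofNat_of_zero_le hn
  unfold pvTileB pvDiagA
  rw [PySem.List.slice_to _ (by positivity), PySem.List.pyRange_one]
  have esz : ((m:Int) * m).toNat = m * m := by
    rw [show ((m:Int) * m) = ((m * m : Nat) : Int) by push_cast; ring, Int.toNat_natCast]
  have e2 : ((m:Int)).toNat = m := by omega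
  rw [esz, e2]
  have hL : ((1 : Int) :: List.replicate m 0).length = m + 1 := by
    simp only [List.length_cons, List.length_replicate]
  have hflatlen : ((List.replicate m ((1 : Int) :: List.replicate m 0)).flatten).length
      = m * (m + 1) := by
    simp only [List.length_flatten, List.map_replicate, hL, List.sum_replicate,
      smul_eq_mul]
  apply List.ext_getElem
  · simp only [List.length_take, hflatlen, List.length_map, List.length_range, sub_zero, esz]
    nlinarith [Nat.min_eq_left (by nlinarith : m * m ≤ m * (m + 1))]
  · intro j h1 h2
    simp only [List.length_take] at h1
    rw [List.getElem_take, pv_flat_rep_get _ (by simp) _ _]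
    have hj : j < m * m := by
      simp only [List.length_map, List.length_range, sub_zero, esz] at h2
      exact h2
    simp only [List.getElem_map, List.getElem_range, zero_add]
    have hmod : PySem.Int.mod (j : Int) ((m:Int) + 1) = ((j % (m + 1) : Nat) : Int) := by
      rw [show ((m:Int) + 1) = ((m + 1 : Nat) : Int) by push_cast; ring]
      exact PySem.Int.mod_natCast j (m + 1)
    have hjsz : (j : Int) < (m : Int) * m := by
      rw [show ((m:Int) * m) = ((m * m : Nat) : Int) by push_cast; ring]
      exact_mod_cast hj
    rcases Nat.eq_zero_or_pos (j % ((1 : Int) :: List.replicate m 0).length) with hz | hp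
    · simp only [hz, List.getElem_cons_zero]
      rw [hL] at hz
      rw [if_pos ⟨by rw [hmod, hz]; rfl, hjsz⟩]
    · have hlt : j % ((1 : Int) :: List.replicate m 0).length
          < ((1 : Int) :: List.replicate m 0).length :=
        Nat.mod_lt _ (by rw [hL]; omega)
      rw [List.getElem_cons]
      rw [dif_neg (by omega), List.getElem_replicate, if_neg]
      rintro ⟨hc, -⟩
      rw [hmod] at hc
      rw [hL] at hp
      have : (j % (m + 1) : Nat) = 0 := by exact_mod_cast hc
      omega

-- doubling: the v = 2 masks are the v = 1 masks scaled elementwise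
theorem pv_row_double (n size r : Int) :
    pvRowA n size 2 r = (pvRowA n size 1 r).map (fun x => 2 * x) := by
  unfold pvRowA
  rw [List.map_map]
  apply List.map_congr_left
  intro i _
  simp only [Function.comp]
  split_ifs <;> ring

theorem pv_diag_double (n size : Int) :
    pvDiagA n size 2 = (pvDiagA n size 1).map (fun x => 2 * x) := by
  unfold pvDiagA
  rw [List.map_map]
  apply List.map_congr_left
  intro i _
  simp only [Function.comp]
  split_ifs <;> ring

-- ===== VERDICT (by name: the statement is the Claim_ definition above) =====
theorem generate_base_masks_spec : Claim_equal_generate_base_masks := by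
  intro n _ hn
  replace hn : 0 ≤ n := hn
  obtain ⟨m, rfl⟩ := Int.eq_ofNat_of_zero_le hn
  unfold Spec_generate_base_masks generate_base_masks generate_base_masks_alt
  simp only [pv_numrows]
  set num := PySem.Int.floordiv ((m:Int) + 1) 2 with hnumdef
  have hnum2 : num = ((m:Int) + 1) / 2 :=
    PySem.Int.floordiv_eq_ediv_of_pos (by omega : (0:Int) < 2)
  have hnum_le : num ≤ (m : Int) := by rw [hnum2]; omega
  have hnum_nonneg : 0 ≤ num := by rw [hnum2]; omega
  rw [pv_fold_shift, PySem.List.foldl_append_singleton_eq_map,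
      PySem.List.foldl_append_singleton_eq_map]
  rw [PySem.List.length_pyRange_one, PySem.List.pyRange_one]
  -- both row-map halves reduce to the same block rows
  have hrow1 : ∀ v : Int,
      (List.range (num - 0).toNat).map ((fun r => pvRowA (m:Int) ((m:Int)*m) v r) ∘ fun (k : Nat) => 0 + (k:Int))
        = (List.range (num - 0).toNat).map
            (fun (k : Nat) => pvRowBlk (m:Int) ((m:Int)*m) v ((k:Int))) := by
    intro v
    apply List.map_congr_left
    intro k hk
    rw [List.mem_range] at hk
    have hk' : (k : Int) < num := by omega
    simp only [Function.comp, zero_add]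
    exact pv_row_eq (m:Int) v (k:Int) (by omega) (by omega) (by omega)
  have hrowB :
      (List.range (num - 0).toNat).map
          (fun i => (pvShiftB (m:Int) ((m:Int)*m))^[i]
            (List.replicate ((m:Int)).toNat 1 ++ List.replicate (((m:Int)*m - m)).toNat 0))
        = (List.range (num - 0).toNat).map
            (fun (k : Nat) => pvRowBlk (m:Int) ((m:Int)*m) 1 ((k:Int))) := by
    apply List.map_congr_left
    intro k hk
    rw [List.mem_range] at hk
    have hk' : (k : Int) < num := by omega
    exact pv_iter_blk m k (by omega)
  simp only [List.map_map]
  rw [hrow1 1, hrow1 2, hrowB, pv_tile_eq (m:Int) (by omega)]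
  rw [pv_diag_double, List.nil_append]
  have hdbl : ((List.range (num - 0).toNat).map
        (fun (k : Nat) => pvRowBlk (m:Int) ((m:Int)*m) 2 ((k:Int))))
      = ((List.range (num - 0).toNat).map
          (fun (k : Nat) => pvRowBlk (m:Int) ((m:Int)*m) 1 ((k:Int)))).map
            (fun l => l.map (fun x => 2 * x)) := by
    rw [List.map_map]
    apply List.map_congr_left
    intro k hk
    rw [List.mem_range] at hk
    have hk' : (k : Int) < num := by omega
    simp only [Function.comp]
    rw [← pv_row_eq (m:Int) 1 (k:Int) (by omega) (by omega) (by omega),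
        ← pv_row_eq (m:Int) 2 (k:Int) (by omega) (by omega) (by omega)]
    exact pv_row_double (m:Int) ((m:Int)*m) (k:Int)
  rw [hdbl]
  simp [List.map_append, List.append_assoc]
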